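-- pv_equiv track=rewrite | github.com/ortemx/university | term6/IB/lab6_2.py | get_possible_keys
-- ===== SOURCE A (Python) =====
-- from itertools import permutations as pt
--
-- def get_possible_keys(known_key: str) -> list:
--     """генерирует всевозможные ключи по
--     восстановленной части
--
--     Args:
--         known_key (_type_): _description_
--     """
--
--     # находим неизвестные значения в ключе
--     unknown_numbers = [i[0] + 1 for i in enumerate(known_key)]
--     for i in known_key:
--         if i.isnumeric():
--             unknown_numbers.remove(int(i))
--
--     # массив, в котором будут храниться всевозможные вырианты
--     possible_keys  = []
--     # генерация перестановок неизвестной части ключа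
--     prmtns = pt(unknown_numbers)
--
--     for prmtn in prmtns:
--         possible_key = [0] * len(known_key)
--         i = 0
--         for j, value in enumerate(known_key):
--             if value.isnumeric():
--                 possible_key[j] = int(value)
--             else:
--                 possible_key[j] = prmtn[i]
--                 i += 1
--         possible_keys.append(possible_key)
--     return possible_keys
-- ===== SOURCE B (Python) =====
-- def get_possible_keys(known_key: str) -> list:
--     """Generate all possible keys for the recovered part.
--
--     Instead of materializing itertools.permutations and rescanning the whole
--     string per permutation, build the keys directly by backtracking over the
--     positions, threading the still-available numbers.
--     """
--     digits = [int(ch) for ch in known_key if ch.isnumeric()]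
--     unknown_numbers = [v for v in range(1, len(known_key) + 1) if v not in digits]
--
--     def build(rest, available, prefix):
--         if not rest:
--             return [prefix]
--         ch = rest[0]
--         if ch.isnumeric():
--             return build(rest[1:], available, prefix + [int(ch)])
--         keys = []
--         for k, v in enumerate(available):
--             keys += build(rest[1:], available[:k] + available[k + 1:], prefix + [v])
--         return keys
--
--     return build(known_key, unknown_numbers, [])
-- ===== Notes on version B (the rewrite author's own statement) =====
-- stated objective: alternative
-- what changed: B replaces itertools.permutations plus a per-permutation full rescan of the string by direct backtracking over the positions: it recurses on the string, threading the list of still-available numbers and the prefix built so far, so each key is built once left-to-right and no permutation tuple or per-key index bookkeeping exists; unknown_numbers is computed as a filter of range(1,n+1) instead of repeated list.remove.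
import Mathlib
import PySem

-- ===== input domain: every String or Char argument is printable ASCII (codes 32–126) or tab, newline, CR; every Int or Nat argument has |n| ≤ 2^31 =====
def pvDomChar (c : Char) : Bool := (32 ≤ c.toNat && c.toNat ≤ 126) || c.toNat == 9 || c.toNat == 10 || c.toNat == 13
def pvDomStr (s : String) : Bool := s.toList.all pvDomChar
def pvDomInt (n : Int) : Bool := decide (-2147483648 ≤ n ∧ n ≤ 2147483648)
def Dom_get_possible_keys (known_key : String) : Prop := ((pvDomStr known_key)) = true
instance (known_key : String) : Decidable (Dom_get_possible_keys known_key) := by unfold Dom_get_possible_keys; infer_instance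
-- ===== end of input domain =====

-- B replaces the permutations-then-rescan loop by direct backtracking over the positions
-- (same output, same cost class; objective: alternative algorithm).

-- ===== PORT A =====
-- int(c) for a single digit character c (the only case A reaches it on)
def pvDigitVal (c : Char) : Int := (c.toNat : Int) - 48

-- A's loop: for i in known_key: if i.isnumeric(): unknown_numbers.remove(int(i))
-- (none = ValueError from .remove; Python str.isnumeric on the printable-ASCII domain is exactly '0'..'9' = PySem.Chars.isdigit)
def pvRemoveLoop : List Char → List Int → Option (List Int)
  | [], ns => some ns
  | c :: cs, ns =>
    if PySem.Chars.isdigit c then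
      match PySem.List.remove? ns (pvDigitVal c) with
      | none => none
      | some ns' => pvRemoveLoop cs ns'
    else pvRemoveLoop cs ns

-- itertools.permutations, ported as the standard selection recursion producing the
-- same lexicographic-by-position order (fuel = length of the pool)
def pvPickEach : List Int → List (Int × List Int)
  | [] => []
  | x :: xs => (x, xs) :: (pvPickEach xs).map (fun p => (p.1, x :: p.2))

def pvPermsF : Nat → List Int → List (List Int)
  | _, [] => [[]]
  | 0, _ :: _ => []
  | n + 1, x :: xs =>
    (pvPickEach (x :: xs)).flatMap (fun p => (pvPermsF n p.2).map (fun q => p.1 :: q))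

def pvPerms (l : List Int) : List (List Int) := pvPermsF l.length l

-- A's inner loop: for j, value in enumerate(known_key): possible_key[j] = …
def pvFillLoop : List (Char × Nat) → List Int → Nat → List Int → List Int
  | [], _, _, key => key
  | (c, j) :: rest, p, i, key =>
    if PySem.Chars.isdigit c then
      pvFillLoop rest p i (key.set j (pvDigitVal c))
    else
      pvFillLoop rest p (i + 1) (key.set j ((PySem.List.pyGet? p (i : Int)).getD 0))

def get_possible_keys (known_key : String) : List (List Int) :=
  match pvRemoveLoop known_key.toList
      ((List.range known_key.toList.length).map (fun k => Int.ofNat k + 1)) with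
  | none => []          -- Python raises ValueError here; excluded by Pre_
  | some unknown =>
    (pvPerms unknown).map (fun prmtn =>
      pvFillLoop known_key.toList.zipIdx prmtn 0
        (List.replicate known_key.toList.length 0))

-- ===== PORT B =====
-- build(rest, available, prefix) of Source B: backtracking over the characters
def pvBuild : List Char → List Int → List Int → List (List Int)
  | [], _, pre => [pre]
  | c :: cs, avail, pre =>
    if PySem.Chars.isdigit c then
      pvBuild cs avail (pre ++ [pvDigitVal c])
    else
      avail.zipIdx.flatMap (fun kv =>
        pvBuild cs (avail.take kv.2 ++ avail.drop (kv.2 + 1)) (pre ++ [kv.1]))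

def get_possible_keys_alt (known_key : String) : List (List Int) :=
  pvBuild known_key.toList
    (((List.range known_key.toList.length).map (fun k => Int.ofNat k + 1)).filter
      (fun v => !((known_key.toList.filter PySem.Chars.isdigit).map pvDigitVal).contains v))
    []

-- ===== PRECONDITION & SPEC =====
-- Pre_ excludes exactly the inputs on which A's list.remove raises ValueError:
-- the numeric characters must name distinct values in 1..len(known_key).
def Pre_get_possible_keys (known_key : String) : Prop :=
  ((known_key.toList.filter PySem.Chars.isdigit).map pvDigitVal).Nodup ∧
  ∀ d ∈ (known_key.toList.filter PySem.Chars.isdigit).map pvDigitVal,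
    1 ≤ d ∧ d ≤ (known_key.toList.length : Int)
instance (known_key : String) : Decidable (Pre_get_possible_keys known_key) := by
  unfold Pre_get_possible_keys; infer_instance

def pvWitness_get_possible_keys : String := "3xy1"

def Spec_get_possible_keys (known_key : String) (out : List (List Int)) : Prop :=
  out = get_possible_keys_alt known_key
instance (known_key : String) (out : List (List Int)) : Decidable (Spec_get_possible_keys known_key out) := by
  unfold Spec_get_possible_keys; infer_instance

-- ===== CLAIM (what is proved, stated in full; the proofs are below) =====
def Claim_equal_get_possible_keys : Prop :=
  ∀ (known_key : String), Dom_get_possible_keys known_key →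
    Pre_get_possible_keys known_key →
    Spec_get_possible_keys known_key (get_possible_keys known_key)

-- ===== LEMMAS AND PROOFS =====

-- A's remove loop, restricted to the digit values it actually removes
def pvRemoveAll : List Int → List Int → Option (List Int)
  | [], ns => some ns
  | d :: ds, ns =>
    match PySem.List.remove? ns d with
    | none => none
    | some ns' => pvRemoveAll ds ns'

-- the value a single permutation produces, consumed front to back
def pvConsume : List Char → List Int → List Int
  | [], _ => []
  | c :: cs, p =>
    if PySem.Chars.isdigit c then pvDigitVal c :: pvConsume cs p
    else p.headD 0 :: pvConsume cs p.tail

theorem pvRemoveLoop_eq_removeAll (chars : List Char) (ns : List Int) :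
    pvRemoveLoop chars ns =
      pvRemoveAll ((chars.filter PySem.Chars.isdigit).map pvDigitVal) ns := by
  
  induction chars generalizing ns with
  | nil => simp [pvRemoveLoop, pvRemoveAll]
  | cons c cs ih =>
    by_cases h : PySem.Chars.isdigit c
    · simp only [pvRemoveLoop, List.filter_cons, h, ite_true, List.map_cons, pvRemoveAll]
      cases PySem.List.remove? ns (pvDigitVal c) <;> simp [ih]
    · simp [pvRemoveLoop, h, ih]

theorem pvRemoveAll_eq_filter (ds : List Int) (ns : List Int)
    (hns : ns.Nodup) (hds : ds.Nodup) (hsub : ∀ d ∈ ds, d ∈ ns) :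
    pvRemoveAll ds ns = some (ns.filter (fun v => !ds.contains v)) := by
  
  induction ds generalizing ns with
  | nil => simp [pvRemoveAll]
  | cons d ds ih =>
    have hd : d ∈ ns := hsub d (by simp)
    have hne : ∀ d' ∈ ds, d' ≠ d := by
      intro d' hd' he; exact (List.nodup_cons.mp hds).1 (he ▸ hd')
    simp only [pvRemoveAll, PySem.List.remove?_eq_some_erase ns d hd]
    rw [ih (ns.erase d) (hns.erase d) (List.nodup_cons.mp hds).2
        (fun d' hd' => (List.mem_erase_of_ne (hne d' hd')).mpr (hsub d' (List.mem_cons_of_mem d hd')))]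
    rw [hns.erase_eq_filter d, List.filter_filter]
    refine congrArg some (List.filter_congr ?_)
    intro v _
    by_cases hv : v = d <;> simp [hv, Bool.and_comm]

theorem pvRemoveAll_length (ds ns ns' : List Int) (h : pvRemoveAll ds ns = some ns') :
    ns'.length + ds.length = ns.length := by
  
  induction ds generalizing ns ns' with
  | nil => simp_all [pvRemoveAll]
  | cons d ds ih =>
    rcases hrm : PySem.List.remove? ns d with _ | m
    · simp [pvRemoveAll, hrm] at h
    · have hd : d ∈ ns := by
        by_contra hmem
        rw [(PySem.List.remove?_eq_none_iff ns d).mpr hmem] at hrm; cases hrm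
      have hm : m = ns.erase d := by
        have := PySem.List.remove?_eq_some_erase ns d hd
        rw [this] at hrm; exact (Option.some.injEq _ _).mp hrm.symm ▸ rfl
      simp only [pvRemoveAll, hrm] at h
      have := ih m ns' h
      have hlen : m.length = ns.length - 1 := by rw [hm]; exact List.length_erase_of_mem hd
      have : ns.length ≥ 1 := List.length_pos_of_mem hd
      simp only [List.length_cons]
      omega

theorem pvCountSplit (chars : List Char) :
    (chars.filter PySem.Chars.isdigit).length
      + (chars.filter (fun c => !PySem.Chars.isdigit c)).length = chars.length := by
  
  induction chars with
  | nil => simp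
  | cons c cs ih =>
    by_cases h : PySem.Chars.isdigit c <;> simp [h] <;> omega

theorem pvPickEach_length (l : List Int) (pr : Int × List Int) (h : pr ∈ pvPickEach l) :
    pr.2.length + 1 = l.length := by
  
  induction l generalizing pr with
  | nil => simp [pvPickEach] at h
  | cons x xs ih =>
    simp only [pvPickEach, List.mem_cons, List.mem_map] at h
    rcases h with h | ⟨q, hq, rfl⟩
    · subst h; simp
    · have := ih q hq; simp; omega

theorem pvPerms_length (fuel : Nat) (l p : List Int) (hf : l.length ≤ fuel)
    (hp : p ∈ pvPermsF fuel l) : p.length = l.length := by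
  
  induction fuel generalizing l p with
  | zero =>
    cases l with
    | nil => simp [pvPermsF] at hp; simp [hp]
    | cons x xs => simp at hf
  | succ n ih =>
    cases l with
    | nil => simp [pvPermsF] at hp; simp [hp]
    | cons x xs =>
      simp only [pvPermsF, List.mem_flatMap, List.mem_map] at hp
      obtain ⟨pr, hpr, q, hq, rfl⟩ := hp
      have hl := pvPickEach_length (x :: xs) pr hpr
      simp only [List.length_cons] at hf hl
      have hq' := ih pr.2 q (by omega) hq
      simp; omega

theorem pvSet_append_len (pre : List Int) (r : Int) (rtl : List Int) (v : Int) :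
    (pre ++ r :: rtl).set pre.length v = pre ++ v :: rtl := by
  
  induction pre with
  | nil => simp
  | cons a pre ih => simp [ih]

theorem pvZipSel (l pre : List Int) :
    (l.zipIdx pre.length).map
        (fun kv => (kv.1, (pre ++ l).take kv.2 ++ (pre ++ l).drop (kv.2 + 1)))
      = (pvPickEach l).map (fun p => (p.1, pre ++ p.2)) := by
  
  induction l generalizing pre with
  | nil => simp [pvPickEach]
  | cons x xs ih =>
    rw [List.zipIdx_cons, pvPickEach]
    simp only [List.map_cons, List.map_map]
    congr 1
    · rw [List.take_left]
      have h1 : pre ++ x :: xs = (pre ++ [x]) ++ xs := by simp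
      have h2 : pre.length + 1 = (pre ++ [x]).length := by simp
      rw [h1, h2, List.drop_left]
    · have h1 : pre ++ x :: xs = (pre ++ [x]) ++ xs := by simp
      have h2 : pre.length + 1 = (pre ++ [x]).length := by simp
      rw [h1, h2, ih (pre ++ [x])]
      refine List.map_congr_left ?_
      intro p _
      simp

theorem pvFill_eq (chars : List Char) (pre rest p : List Int) (i : Nat)
    (hr : rest.length = chars.length)
    (hp : (chars.filter (fun c => !PySem.Chars.isdigit c)).length + i ≤ p.length) :
    pvFillLoop (chars.zipIdx pre.length) p i (pre ++ rest)
      = pre ++ pvConsume chars (p.drop i) := by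
  
  induction chars generalizing pre rest i with
  | nil =>
    have : rest = [] := List.length_eq_zero_iff.mp hr
    simp [this, pvFillLoop, pvConsume]
  | cons c cs ih =>
    rcases rest with _ | ⟨r, rtl⟩
    · simp at hr
    rw [List.zipIdx_cons, pvFillLoop]
    by_cases hc : PySem.Chars.isdigit c
    · rw [if_pos hc, pvSet_append_len]
      have h1 : pre ++ pvDigitVal c :: rtl = (pre ++ [pvDigitVal c]) ++ rtl := by simp
      have h2 : pre.length + 1 = (pre ++ [pvDigitVal c]).length := by simp
      rw [h1, h2, ih (pre ++ [pvDigitVal c]) rtl i (by simpa using hr)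
            (by simpa [List.filter_cons, hc] using hp)]
      simp [pvConsume, hc]
    · have hi : i < p.length := by
        simp only [List.filter_cons, hc] at hp
        simp at hp; omega
      rw [if_neg hc, pvSet_append_len]
      have hv : (PySem.List.pyGet? p (i : Int)).getD 0 = p[i] := by
        rw [PySem.List.pyGet?_natCast, List.getElem?_eq_getElem hi]; rfl
      have h1 : ∀ v : Int, pre ++ v :: rtl = (pre ++ [v]) ++ rtl := by intro v; simp
      have h2 : ∀ v : Int, pre.length + 1 = (pre ++ [v]).length := by intro v; simp
      rw [h1, h2, ih (pre ++ [_]) rtl (i + 1) (by simpa using hr)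
            (by simp only [List.filter_cons, hc] at hp ⊢; simp at hp ⊢; omega)]
      rw [List.drop_eq_getElem_cons hi]
      simp [pvConsume, hc]

theorem pvBuild_eq (chars : List Char) (avail pre : List Int) (fuel : Nat)
    (ha : avail.length = (chars.filter (fun c => !PySem.Chars.isdigit c)).length)
    (hf : avail.length ≤ fuel) :
    pvBuild chars avail pre = (pvPermsF fuel avail).map (fun p => pre ++ pvConsume chars p) := by
  
  induction chars generalizing avail pre fuel with
  | nil =>
    have : avail = [] := List.length_eq_zero_iff.mp (by simpa using ha)
    subst this
    cases fuel <;> simp [pvBuild, pvPermsF, pvConsume]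
  | cons c cs ih =>
    by_cases hc : PySem.Chars.isdigit c
    · rw [pvBuild, if_pos hc,
        ih avail (pre ++ [pvDigitVal c]) fuel (by simpa [List.filter_cons, hc] using ha) hf]
      refine List.map_congr_left ?_
      intro q _
      simp [pvConsume, hc]
    · have ha' : avail.length = (cs.filter (fun c => !PySem.Chars.isdigit c)).length + 1 := by
        simpa [List.filter_cons, hc] using ha
      rcases avail with _ | ⟨a, as⟩
      · simp at ha'
      rcases fuel with _ | f
      · simp at hf
      rw [pvBuild, if_neg hc]
      have hz := pvZipSel (a :: as) []
      simp only [List.nil_append, List.length_nil] at hz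
      calc ((a :: as).zipIdx 0).flatMap (fun kv =>
              pvBuild cs ((a :: as).take kv.2 ++ (a :: as).drop (kv.2 + 1)) (pre ++ [kv.1]))
          = (((a :: as).zipIdx 0).map
              (fun kv => (kv.1, (a :: as).take kv.2 ++ (a :: as).drop (kv.2 + 1)))).flatMap
              (fun pr => pvBuild cs pr.2 (pre ++ [pr.1])) := by
            rw [List.flatMap_map]
        _ = (pvPickEach (a :: as)).flatMap (fun pr => pvBuild cs pr.2 (pre ++ [pr.1])) := by
            rw [hz, List.flatMap_map]
        _ = (pvPermsF (f + 1) (a :: as)).map (fun p => pre ++ pvConsume (c :: cs) p) := by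
            rw [pvPermsF, List.map_flatMap]
            rw [List.flatMap_def, List.flatMap_def]
            refine congrArg List.flatten (List.map_congr_left ?_)
            intro pr hpr
            have hlen : pr.2.length = (cs.filter (fun c => !PySem.Chars.isdigit c)).length := by
              have := pvPickEach_length (a :: as) pr hpr
              simp only [List.length_cons] at this ha' hf
              omega
            have hfl : pr.2.length ≤ f := by
              have := pvPickEach_length (a :: as) pr hpr
              simp only [List.length_cons] at this hf ha'
              omega
            rw [ih pr.2 (pre ++ [pr.1]) f hlen hfl, List.map_map]
            refine List.map_congr_left ?_
            intro q _
            simp [pvConsume, hc]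

-- ===== VERDICT =====
theorem get_possible_keys_spec : Claim_equal_get_possible_keys := by
  
  intro known_key _ hpre
  unfold Spec_get_possible_keys
  show get_possible_keys known_key = get_possible_keys_alt known_key
  obtain ⟨hnd, hbound⟩ := hpre
  simp only [get_possible_keys, get_possible_keys_alt]
  set chars := known_key.toList with hch
  set ds := (chars.filter PySem.Chars.isdigit).map pvDigitVal with hds
  set init := (List.range chars.length).map (fun k => Int.ofNat k + 1) with hinitdef
  have hinit : init.Nodup := by
    rw [hinitdef]
    refine List.Nodup.map ?_ List.nodup_range
    intro a b hab
    simp only [Int.ofNat_eq_natCast] at hab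
    omega
  have hmem_init : ∀ d : Int, d ∈ init ↔ 1 ≤ d ∧ d ≤ (chars.length : Int) := by
    intro d
    simp only [hinitdef, List.mem_map, List.mem_range, Int.ofNat_eq_natCast]
    constructor
    · rintro ⟨k, hk, rfl⟩; omega
    · rintro ⟨h1, h2⟩
      exact ⟨(d - 1).toNat, by omega, by omega⟩
  have hsub : ∀ d ∈ ds, d ∈ init := fun d hd => (hmem_init d).mpr (hbound d hd)
  have hrmAll : pvRemoveAll ds init = some (init.filter (fun v => !ds.contains v)) :=
    pvRemoveAll_eq_filter ds init hinit hnd hsub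
  have hrm : pvRemoveLoop chars init = some (init.filter (fun v => !ds.contains v)) := by
    rw [pvRemoveLoop_eq_removeAll]; exact hrmAll
  set unknown := init.filter (fun v => !ds.contains v) with hu
  have hlen1 : unknown.length + ds.length = init.length :=
    pvRemoveAll_length ds init unknown hrmAll
  have hlen2 : ds.length = (chars.filter PySem.Chars.isdigit).length := by
    simp [hds]
  have hlen3 : init.length = chars.length := by simp [hinitdef]
  have hcount := pvCountSplit chars
  have hulen : unknown.length = (chars.filter (fun c => !PySem.Chars.isdigit c)).length := by
    omega
  simp only [hrm]
  rw [pvBuild_eq chars unknown [] unknown.length hulen (le_refl _), pvPerms]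
  refine List.map_congr_left ?_
  intro p hp
  have hplen : p.length = unknown.length := pvPerms_length _ _ _ (le_refl _) hp
  have hfill := pvFill_eq chars [] (List.replicate chars.length 0) p 0
    (by simp) (by omega)
  simpa using hfill
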